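-- pv_equiv track=rewrite | github.com/sensorlab/energy-knowledge-graph | src/NUK.py | class_weights_tool
-- ===== SOURCE A (Python) =====
-- def class_weights_tool(y_test: list):
--     """
--     This function returns class weights for each device in a prticular dataset in a form of a dicitionary.
--     It does so by simply counting how many times the device is present througout the dataset.
--
--     Args:
--         y_test (list): the usual y_test part of the dataset, used in ML
--
--     Returns:
--         class_weights_dictionary (dict): a dictionary which contains a number for each device which represents how many times the device appears in the dataset
--     """
--     # inspired by ronnie coleman
--     light_weight, nums = [], []
--
--     # this for loop goes over the collumns of the y_test dataset
--     for j in range(0,len(y_test[0])):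
--
--         count=0
--
--         # gives 0,1,2,3,4,5,6....
--         nums.append(j)
--
--         # this loop goes over the rows in the y_test dataset
--         for i in range(0,len(y_test)):
--
--             # we count Trues in the whole column of y_test dataset
--             if y_test[i][j] == True: count+=1
--
--         # we append Trues for the column of y_test dataset to the list light_weight
--         light_weight.append(count)
--
--     # makes the dictionary
--     class_weights_dictionary = dict(zip(nums, light_weight))
--
--     return class_weights_dictionary
-- ===== SOURCE B (Python) =====
-- def class_weights_tool(y_test: list):
--     # Single row-major sweep: one pass over the rows, maintaining all column counts at once.
--     n = len(y_test[0])
--     acc = [0] * n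
--     for row in y_test:
--         acc = [acc[j] + (1 if row[j] == True else 0) for j in range(n)]
--     return {j: c for j, c in enumerate(acc)}
-- ===== Notes on version B (the rewrite author's own statement) =====
-- stated objective: alternative
-- what changed: Column-major double scan with two parallel appended lists and a final dict(zip(...)) is replaced by a single row-major sweep that maintains one vector of all column counts and enumerates it at the end.
import Mathlib
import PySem

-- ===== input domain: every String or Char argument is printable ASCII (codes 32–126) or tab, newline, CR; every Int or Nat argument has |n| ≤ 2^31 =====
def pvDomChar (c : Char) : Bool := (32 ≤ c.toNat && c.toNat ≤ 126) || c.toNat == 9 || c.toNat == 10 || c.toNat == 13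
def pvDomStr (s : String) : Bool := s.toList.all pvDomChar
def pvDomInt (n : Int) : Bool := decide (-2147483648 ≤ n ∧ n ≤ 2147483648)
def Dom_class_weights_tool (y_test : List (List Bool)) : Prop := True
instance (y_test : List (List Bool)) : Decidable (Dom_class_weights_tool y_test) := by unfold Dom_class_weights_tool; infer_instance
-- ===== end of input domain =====

-- B replaces A's column-major double scan (two parallel appended lists + dict(zip)) by a single
-- row-major sweep maintaining one vector of all column counts, enumerated at the end (alternative, same cost).


-- ===== PORT A =====
def class_weights_tool (y_test : List (List Bool)) : List (Int × Int) :=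
  let n : Int := (PySem.List.pyGetD y_test 0 []).length
  let st := (PySem.List.pyRange 0 n 1).foldl
    (fun (st : List Int × List Int) j =>
      let nums := st.2 ++ [j]
      let count := (PySem.List.pyRange 0 (y_test.length : Int) 1).foldl
        (fun c i => if PySem.List.pyGetD (PySem.List.pyGetD y_test i []) j false == true then c + 1 else c) 0
      (st.1 ++ [count], nums))
    ([], [])
  st.2.zip st.1

-- ===== PORT B =====
def class_weights_tool_alt (y_test : List (List Bool)) : List (Int × Int) :=
  let n : Int := (PySem.List.pyGetD y_test 0 []).length
  let acc := y_test.foldl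
    (fun acc row => (PySem.List.pyRange 0 n 1).map
      (fun j => PySem.List.pyGetD acc j 0 + (if PySem.List.pyGetD row j false == true then 1 else 0)))
    (List.replicate n.toNat 0)
  PySem.List.enumerate acc

-- ===== PRECONDITION & SPEC =====
-- Pre_ excludes exactly the inputs where Python A raises IndexError: the empty list (y_test[0])
-- and ragged inputs with some row shorter than row 0 (y_test[i][j]).
def Pre_class_weights_tool (y_test : List (List Bool)) : Prop :=
  y_test ≠ [] ∧ ∀ row ∈ y_test, y_test.headI.length ≤ row.length
instance (y_test : List (List Bool)) : Decidable (Pre_class_weights_tool y_test) := by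
  unfold Pre_class_weights_tool; infer_instance
def pvWitness_class_weights_tool : List (List Bool) := [[true, false], [true, true], [false, false]]
def Spec_class_weights_tool (y_test : List (List Bool)) (out : List (Int × Int)) : Prop := out = class_weights_tool_alt y_test
instance (y_test : List (List Bool)) (out : List (Int × Int)) : Decidable (Spec_class_weights_tool y_test out) := by unfold Spec_class_weights_tool; infer_instance

-- ===== CLAIM (what is proved, stated in full; the proofs are below) =====
def Claim_equal_class_weights_tool : Prop := ∀ (y_test : List (List Bool)), Dom_class_weights_tool y_test → Pre_class_weights_tool y_test → Spec_class_weights_tool y_test (class_weights_tool y_test)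

-- ===== LEMMAS AND PROOFS =====

-- the per-column count both programs compute
def pvCnt (rows : List (List Bool)) (j : Int) : Int :=
  (rows.countP (fun row => PySem.List.pyGetD row j false == true) : Int)

-- A's inner index loop is pvCnt
lemma aInner_eq_cnt (rows : List (List Bool)) (j : Int) :
    (PySem.List.pyRange 0 (rows.length : Int) 1).foldl
      (fun c i => if PySem.List.pyGetD (PySem.List.pyGetD rows i []) j false == true then c + 1 else c) 0
    = pvCnt rows j := by
  rw [PySem.List.foldl_pyRange_zero_pyGetD' rows []
      (fun c row => if PySem.List.pyGetD row j false == true then c + 1 else c) 0,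
    PySem.List.foldl_if_add_one]
  simp [pvCnt]

-- B's row sweep, invariant form
lemma bFold_inv (rows : List (List Bool)) (n : Int) (g : Int → Int) :
    rows.foldl
      (fun acc row => (PySem.List.pyRange 0 n 1).map
        (fun j => PySem.List.pyGetD acc j 0 + (if PySem.List.pyGetD row j false == true then 1 else 0)))
      ((PySem.List.pyRange 0 n 1).map g)
    = (PySem.List.pyRange 0 n 1).map (fun j => g j + pvCnt rows j) := by
  induction rows generalizing g with
  | nil => simp [pvCnt]
  | cons row rest ih =>
    simp only [List.foldl_cons]
    have hstep : (PySem.List.pyRange 0 n 1).map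
        (fun j => PySem.List.pyGetD ((PySem.List.pyRange 0 n 1).map g) j 0 +
          (if PySem.List.pyGetD row j false == true then 1 else 0))
        = (PySem.List.pyRange 0 n 1).map
          (fun j => g j + (if PySem.List.pyGetD row j false == true then 1 else 0)) := by
      apply List.map_congr_left
      intro j hj
      rw [PySem.List.mem_pyRange_one] at hj
      rw [PySem.List.pyGetD_map_pyRange_of_nonneg g n j 0 hj.1 hj.2]
    rw [hstep, ih]
    apply List.map_congr_left
    intro j _
    simp only [pvCnt, List.countP_cons]
    by_cases h : PySem.List.pyGetD row j false == true <;> simp [h] <;> omega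

-- ===== VERDICT (by name: the statement is the Claim_ definition above) =====
theorem class_weights_tool_spec : Claim_equal_class_weights_tool := by
  intro y_test _ hpre
  unfold Spec_class_weights_tool class_weights_tool class_weights_tool_alt
  obtain ⟨hne, _⟩ := hpre
  dsimp only
  set n : Int := ((PySem.List.pyGetD y_test 0 []).length : Int) with hn
  -- A's outer loop: two independent appended lists
  rw [PySem.List.foldl_prod_mk
      (f := fun (acc : List Int) (j : Int) => acc ++ [(PySem.List.pyRange 0 (y_test.length : Int) 1).foldl
        (fun c i => if PySem.List.pyGetD (PySem.List.pyGetD y_test i []) j false == true then c + 1 else c) 0])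
      (g := fun (acc : List Int) (j : Int) => acc ++ [j])]
  rw [PySem.List.foldl_append_singleton_eq_map, PySem.List.foldl_append_singleton_eq_self]
  simp only [List.nil_append]
  -- B's fold from the replicate start
  have hrepl : (List.replicate n.toNat (0 : Int)) = (PySem.List.pyRange 0 n 1).map (fun _ => 0) := by
    rw [List.map_const', PySem.List.length_pyRange_one]
    norm_num
  rw [hrepl, bFold_inv y_test n (fun _ => 0)]
  -- enumerate of a list of length n.toNat starting at 0 is zip with pyRange 0 n
  have hlen : ((PySem.List.pyRange 0 n 1).map (fun j => 0 + pvCnt y_test j)).length = n.toNat := by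
    simp [PySem.List.length_pyRange_one]
  have henum : ∀ (l : List Int) (s : Int),
      PySem.List.enumerate l s = (PySem.List.pyRange s (s + l.length) 1).zip l := by
    intro l
    induction l with
    | nil => intro s; simp [PySem.List.enumerate_nil, PySem.List.pyRange_one_eq_nil]
    | cons x xs ih =>
      intro s
      rw [PySem.List.enumerate_cons, PySem.List.pyRange_one_cons (by
        simp only [List.length_cons]; push_cast; omega)]
      simp only [List.zip_cons_cons, ih (s + 1), List.length_cons]
      congr 2
      push_cast; ring
  rw [henum, hlen]
  simp only [zero_add]
  have hn0 : 0 ≤ n := by simp [hn]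
  rw [show ((n.toNat : Int)) = n by omega]
  -- both sides are zips of the same range; compare the count lists
  congr 1
  apply List.map_congr_left
  intro j _
  rw [aInner_eq_cnt]
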